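-- pv_equiv track=rewrite | github.com/HebaAliNassif/AI_Powered_Interviewer_System | PersonalityAssessment/Files/PersonalityAssessment.py | calculateDF
-- ===== SOURCE A (Python) =====
-- def calculateDF(data):
--     numberOfDocuments = len(data)
--     DF = {}
--     #Set word as the key and the list of doc id’s as the value
--     for i in range(numberOfDocuments):
--         tokens = data[i]
--
--         for w in tokens.split():
--             try:
--                 DF[w].add(i)
--             except:
--                 DF[w] = {i}
--
--     # Replace the list of docs with its count
--     for i in DF:
--         DF[i] = len(DF[i])
--
--     return DF
-- ===== SOURCE B (Python) =====
-- def calculateDF(data):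
--     # Staged: flatten each document's distinct words into one list, then count occurrences.
--     occurrences = [w for doc in data for w in dict.fromkeys(doc.split())]
--     return {w: occurrences.count(w) for w in dict.fromkeys(occurrences)}
-- ===== Notes on version B (the rewrite author's own statement) =====
-- stated objective: alternative
-- what changed: B makes no incremental per-word accumulation at all: it flattens each document's distinct words (dict.fromkeys) into one occurrence list and then builds the result by counting each distinct word in that list, instead of A's dict of per-word doc-id sets followed by a length-replacing pass.
import Mathlib
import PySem

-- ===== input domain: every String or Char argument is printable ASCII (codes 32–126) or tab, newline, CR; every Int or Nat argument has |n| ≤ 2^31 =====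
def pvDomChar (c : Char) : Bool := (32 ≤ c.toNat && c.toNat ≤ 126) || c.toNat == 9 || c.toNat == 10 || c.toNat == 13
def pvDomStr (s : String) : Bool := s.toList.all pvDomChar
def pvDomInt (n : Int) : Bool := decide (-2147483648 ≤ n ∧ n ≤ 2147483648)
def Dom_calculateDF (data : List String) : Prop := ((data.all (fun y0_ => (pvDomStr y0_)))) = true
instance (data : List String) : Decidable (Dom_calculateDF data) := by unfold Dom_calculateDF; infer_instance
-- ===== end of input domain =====

-- B replaces A's incremental dict of per-word doc-id sets (plus a length-replacing second pass) by a
-- staged computation: flatten each document's distinct words into one occurrence list, then count.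

-- ===== PORT A =====
def calculateDF (data : List String) : List (String × Int) :=
  -- numberOfDocuments = len(data); DF built by the doubly nested loop; then every value
  -- is replaced by its length, in key order (= a value-wise map over the items)
  ((PySem.List.pyRange 0 (data.length : Int)).foldl
      (fun DF i =>
        ((PySem.Str.split₀ (PySem.List.pyGetD data i "")).foldl
          (fun DF w => DF.modify w PySem.Set.empty (fun s => PySem.Set.add s i)) DF))
      (PySem.Dict.empty : PySem.Dict String (PySem.Set Int))).items.map
    (fun p => (p.1, PySem.Set.len p.2))

-- ===== PORT B =====
def calculateDF_alt (data : List String) : List (String × Int) :=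
  -- occurrences = [w for doc in data for w in dict.fromkeys(doc.split())]
  let occurrences := data.flatMap (fun doc => PySem.List.dedup (PySem.Str.split₀ doc))
  -- {w: occurrences.count(w) for w in dict.fromkeys(occurrences)}
  (PySem.List.dedup occurrences).map (fun w => (w, (PySem.List.count occurrences w : Int)))

-- ===== PRECONDITION & SPEC =====
def Spec_calculateDF (data : List String) (out : List (String × Int)) : Prop := out = calculateDF_alt data
instance (data : List String) (out : List (String × Int)) : Decidable (Spec_calculateDF data out) := by unfold Spec_calculateDF; infer_instance

-- ===== CLAIM (what is proved, stated in full; the proofs are below) =====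
def Claim_equal_calculateDF : Prop := ∀ (data : List String), Dom_calculateDF data → Spec_calculateDF data (calculateDF data)

-- ===== LEMMAS AND PROOFS =====

-- A's per-document inner loop, with the document index i
def pvStepA (data : List String) (DF : PySem.Dict String (PySem.Set Int)) (i : Int) :
    PySem.Dict String (PySem.Set Int) :=
  (PySem.Str.split₀ (PySem.List.pyGetD data i "")).foldl
    (fun DF w => DF.modify w PySem.Set.empty (fun s => PySem.Set.add s i)) DF

-- A's outer loop as structural recursion on the remaining documents
def pvLoopA (data : List String) (i : Int) : List String → PySem.Dict String (PySem.Set Int) →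
    PySem.Dict String (PySem.Set Int)
  | [], DF => DF
  | _ :: r, DF => pvLoopA data (i + 1) r (pvStepA data DF i)

-- B's occurrence list for a list of documents
def pvOcc (docs : List String) : List String :=
  docs.flatMap (fun doc => PySem.Set.ofList (PySem.Str.split₀ doc))

-- outer invariant before processing document i: A's dict, described by the occurrence list so far
def pvRel (i : Int) (os : List String) (dA : PySem.Dict String (PySem.Set Int)) : Prop :=
  dA.keys = PySem.Set.ofList os ∧
  ∀ k : String, PySem.Set.len (dA.getD k PySem.Set.empty) = (List.count k os : Int) ∧
    ∀ j ∈ dA.getD k PySem.Set.empty, j < i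

-- inner invariant while processing document i, with the distinct words of it seen so far
def pvIRel (i : Int) (os : List String) (seen : PySem.Set String)
    (dA : PySem.Dict String (PySem.Set Int)) : Prop :=
  dA.keys = PySem.Set.ofList (os ++ seen) ∧
  ∀ k : String, PySem.Set.len (dA.getD k PySem.Set.empty) = (List.count k (os ++ seen) : Int) ∧
    (∀ j ∈ dA.getD k PySem.Set.empty, j ≤ i) ∧ (i ∈ dA.getD k PySem.Set.empty ↔ k ∈ seen)

lemma pvFoldA_eq_loopA (data : List String) : ∀ (n : Nat) (k : Nat), data.length - k = n →
    ∀ DF, (PySem.List.pyRange (k : Int) (data.length : Int)).foldl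
        (fun DF i =>
          ((PySem.Str.split₀ (PySem.List.pyGetD data i "")).foldl
            (fun DF w => DF.modify w PySem.Set.empty (fun s => PySem.Set.add s i)) DF)) DF
      = pvLoopA data (k : Int) (data.drop k) DF := by
  intro n
  induction n with
  | zero =>
    intro k hk DF
    have hle : data.length ≤ k := by omega
    have h1 : PySem.List.pyRange (k : Int) (data.length : Int) = [] := by
      simp [PySem.List.pyRange]; omega
    have h2 : data.drop k = [] := List.drop_eq_nil_of_le hle
    rw [h1, h2]; rfl
  | succ n ih =>
    intro k hk DF
    have hlt : k < data.length := by omega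
    have h1 : PySem.List.pyRange (k : Int) (data.length : Int)
        = (k : Int) :: PySem.List.pyRange ((k : Int) + 1) (data.length : Int) :=
      PySem.List.pyRange_one_cons (by exact_mod_cast hlt)
    have h2 : data.drop k = data[k] :: data.drop (k + 1) :=
      (List.getElem_cons_drop hlt).symm
    rw [h1, h2, List.foldl_cons]
    show (PySem.List.pyRange ((k : Int) + 1) (data.length : Int)).foldl _ _
        = pvLoopA data ((k : Int) + 1) (data.drop (k + 1)) (pvStepA data DF (k : Int))
    have hcast : ((k : Int) + 1) = ((k + 1 : Nat) : Int) := by push_cast; ring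
    rw [hcast]
    have := ih (k + 1) (by omega) (pvStepA data DF (k : Int))
    rw [← this]
    rfl

-- Set facts specialised to our use
lemma pvSet_add_of_mem {α : Type} [BEq α] [LawfulBEq α] (s : PySem.Set α) (x : α) (h : x ∈ s) :
    PySem.Set.add s x = s := by
  simp [PySem.Set.add, h]

lemma pvSet_add_of_not_mem {α : Type} [BEq α] [LawfulBEq α] (s : PySem.Set α) (x : α) (h : x ∉ s) :
    PySem.Set.add s x = s ++ [x] := by
  simp [PySem.Set.add, h]

lemma pvOfList_snoc {α : Type} [BEq α] [LawfulBEq α] (l : List α) (x : α) :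
    PySem.Set.ofList (l ++ [x]) = PySem.Set.add (PySem.Set.ofList l) x := by
  rw [PySem.Set.ofList_eq_foldl, PySem.Set.ofList_eq_foldl, List.foldl_append]
  rfl

lemma pvInner (i : Int) (os : List String) : ∀ (ws : List String) (seen : PySem.Set String)
    (dA : PySem.Dict String (PySem.Set Int)), pvIRel i os seen dA →
    pvIRel i os (ws.foldl PySem.Set.add seen)
      (ws.foldl (fun d w => d.modify w PySem.Set.empty (fun s => PySem.Set.add s i)) dA) := by
  intro ws
  induction ws with
  | nil => intro seen dA h; exact h
  | cons w ws ih =>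
    intro seen dA h
    obtain ⟨hkeys, hvals⟩ := h
    simp only [List.foldl_cons]
    by_cases hw : w ∈ seen
    · -- w already seen in this document: both sides are no-ops
      rw [pvSet_add_of_mem seen w hw]
      apply ih
      have hiw : i ∈ dA.getD w PySem.Set.empty := ((hvals w).2.2).mpr hw
      have hcontA : dA.contains w = true := by
        by_contra hc
        have : dA.contains w = false := by cases h' : dA.contains w; rfl; exact absurd h' hc
        rw [PySem.Dict.getD_of_not_contains dA PySem.Set.empty this] at hiw
        simp [PySem.Set.empty] at hiw
      refine ⟨?_, ?_⟩
      · rw [PySem.Dict.keys_modify, PySem.Dict.keys_insert_of_contains _ _ hcontA]; exact hkeys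
      · intro k
        rw [PySem.Dict.getD_modify]
        by_cases hkw : k = w
        · subst hkw
          rw [if_pos rfl, pvSet_add_of_mem _ _ hiw]
          exact hvals k
        · rw [if_neg hkw]; exact hvals k
    · -- first occurrence of w in this document
      rw [pvSet_add_of_not_mem seen w hw]
      apply ih
      have hiw : i ∉ dA.getD w PySem.Set.empty := fun hmem => hw (((hvals w).2.2).mp hmem)
      refine ⟨?_, ?_⟩
      · -- keys
        rw [PySem.Dict.keys_modify, ← List.append_assoc, pvOfList_snoc]
        cases hc : dA.contains w with
        | true =>
          rw [PySem.Dict.keys_insert_of_contains _ _ hc, hkeys]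
          have hmem : w ∈ PySem.Set.ofList (os ++ seen) := by
            rw [← hkeys]; exact (PySem.Dict.contains_iff_mem_keys dA w).mp hc
          rw [pvSet_add_of_mem _ _ hmem]
        | false =>
          rw [PySem.Dict.keys_insert_of_not_contains _ _ hc, hkeys]
          have hnmem : w ∉ PySem.Set.ofList (os ++ seen) := by
            rw [← hkeys]
            intro hm
            rw [(PySem.Dict.contains_iff_mem_keys dA w).mpr hm] at hc
            cases hc
          rw [pvSet_add_of_not_mem _ _ hnmem]
      · intro k
        rw [PySem.Dict.getD_modify, ← List.append_assoc]
        by_cases hkw : k = w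
        · subst hkw
          rw [if_pos rfl, pvSet_add_of_not_mem _ _ hiw]
          refine ⟨?_, ?_, ?_⟩
          · have h1 := (hvals k).1
            have h2 : List.count k (os ++ seen ++ [k]) = List.count k (os ++ seen) + 1 := by
              simp [List.count_append]
              omega
            simp only [PySem.Set.len, List.length_append, List.length_singleton] at h1 ⊢
            rw [h2]
            push_cast
            omega
          · intro j hj
            rcases List.mem_append.mp hj with hj | hj
            · exact (hvals k).2.1 j hj
            · simp at hj; omega
          · simp
        · rw [if_neg hkw]
          refine ⟨?_, (hvals k).2.1, ?_⟩
          · have hne : w ≠ k := fun h => hkw h.symm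
            have h2 : List.count k (os ++ seen ++ [w]) = List.count k (os ++ seen) := by
              simp [List.count_append, hne]
            rw [h2]
            exact (hvals k).1
          · rw [List.mem_append, List.mem_singleton]
            constructor
            · intro hm; exact Or.inl (((hvals k).2.2).mp hm)
            · rintro (hm | hm)
              · exact ((hvals k).2.2).mpr hm
              · exact absurd hm hkw

lemma pvOuter (data : List String) : ∀ (docs : List String) (i : Int) (os : List String)
    (dA : PySem.Dict String (PySem.Set Int)),
    (∀ idx : Int, i ≤ idx → idx < i + docs.length →
      PySem.List.pyGetD data idx "" = PySem.List.pyGetD docs (idx - i) "") →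
    pvRel i os dA →
    pvRel (i + docs.length) (os ++ pvOcc docs) (pvLoopA data i docs dA) := by
  intro docs
  induction docs with
  | nil => intro i os dA _ h; simpa [pvOcc] using h
  | cons t r ih =>
    intro i os dA hget h
    obtain ⟨hkeys, hvals⟩ := h
    have hlenc : (((t :: r).length : Nat) : Int) = (r.length : Int) + 1 := by
      simp only [List.length_cons]; push_cast; ring
    have hdata : PySem.List.pyGetD data i "" = t := by
      have h := hget i le_rfl (by rw [hlenc]; omega)
      rw [h]
      have h0 : i - i = (0 : Int) := by omega
      rw [h0, PySem.List.pyGetD_eq_getElem (t :: r) "" le_rfl (by rw [hlenc]; omega)]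
      simp
    simp only [pvLoopA]
    have hstart : pvIRel i os PySem.Set.empty dA := by
      refine ⟨by simpa [PySem.Set.empty] using hkeys, fun k => ⟨?_, ?_, ?_⟩⟩
      · simpa [PySem.Set.empty] using (hvals k).1
      · intro j hj; exact le_of_lt ((hvals k).2 j hj)
      · constructor
        · intro hm; exact absurd rfl (ne_of_lt ((hvals k).2 i hm))
        · intro hm; simp [PySem.Set.empty] at hm
    have hin := pvInner i os (PySem.Str.split₀ t) PySem.Set.empty dA hstart
    have hseen : (PySem.Str.split₀ t).foldl PySem.Set.add PySem.Set.empty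
        = PySem.Set.ofList (PySem.Str.split₀ t) := by
      rw [PySem.Set.ofList_eq_foldl]; rfl
    rw [hseen] at hin
    obtain ⟨hkeys', hvals'⟩ := hin
    have hrel' : pvRel (i + 1) (os ++ PySem.Set.ofList (PySem.Str.split₀ t)) (pvStepA data dA i) := by
      refine ⟨?_, fun k => ⟨?_, ?_⟩⟩
      · simpa [pvStepA, hdata] using hkeys'
      · simpa [pvStepA, hdata] using (hvals' k).1
      · intro j hj
        have hj' : j ∈ ((PySem.Str.split₀ t).foldl
            (fun d w => d.modify w PySem.Set.empty (fun s => PySem.Set.add s i)) dA).getD k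
            PySem.Set.empty := by simpa [pvStepA, hdata] using hj
        have := (hvals' k).2.1 j hj'
        omega
    have hget' : ∀ idx : Int, i + 1 ≤ idx → idx < (i + 1) + r.length →
        PySem.List.pyGetD data idx "" = PySem.List.pyGetD r (idx - (i + 1)) "" := by
      intro idx h1 h2
      have h := hget idx (by omega) (by rw [hlenc]; omega)
      rw [h]
      have e1 : idx - i = (idx - (i + 1)) + 1 := by ring
      rw [e1, PySem.List.pyGetD_eq_getElem (t :: r) "" (by omega) (by rw [hlenc]; omega),
          PySem.List.pyGetD_eq_getElem r "" (by omega) (by omega)]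
      have e2 : ((idx - (i + 1)) + 1).toNat = (idx - (i + 1)).toNat + 1 := by omega
      simp [e2]
    have := ih (i + 1) (os ++ PySem.Set.ofList (PySem.Str.split₀ t)) (pvStepA data dA i)
      hget' hrel'
    have hlen : i + ((t :: r).length : Int) = (i + 1) + (r.length : Int) := by
      simp; ring
    have hocc : (os ++ PySem.Set.ofList (PySem.Str.split₀ t)) ++ pvOcc r
        = os ++ pvOcc (t :: r) := by
      simp [pvOcc, List.flatMap_cons, List.append_assoc]
    rw [hlen, ← hocc]
    exact this

lemma pvGetD_self (docs : List String) : ∀ idx : Int, 0 ≤ idx → idx < (0 : Int) + docs.length →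
    PySem.List.pyGetD docs idx "" = PySem.List.pyGetD docs (idx - 0) "" := by
  intro idx _ _; rw [sub_zero]

-- ===== VERDICT (by name: the statement is the Claim_ definition above) =====
theorem calculateDF_spec : Claim_equal_calculateDF := by
  intro data _
  unfold Spec_calculateDF calculateDF calculateDF_alt
  have hA := pvFoldA_eq_loopA data data.length 0 rfl PySem.Dict.empty
  simp only [Nat.cast_zero, List.drop_zero] at hA
  rw [hA]
  have hrel0 : pvRel 0 [] PySem.Dict.empty := by
    refine ⟨rfl, fun k => ⟨?_, ?_⟩⟩
    · simp [PySem.Dict.getD_empty, PySem.Set.len, PySem.Set.empty]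
    · intro j hj
      simp [PySem.Dict.getD_empty, PySem.Set.empty] at hj
  have hrel := pvOuter data data 0 [] PySem.Dict.empty (pvGetD_self data) hrel0
  obtain ⟨hkeys, hvals⟩ := hrel
  simp only [List.nil_append] at hkeys hvals
  set dA := pvLoopA data 0 data PySem.Dict.empty with hdA
  have hnod : dA.keys.Nodup := by rw [hkeys]; exact PySem.Set.nodup_ofList _
  rw [PySem.Dict.items_eq_map_keys dA hnod PySem.Set.empty, List.map_map, hkeys]
  simp only [PySem.List.dedup_eq_ofList, pvOcc] at *
  apply List.map_congr_left
  intro k _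
  simp only [Function.comp]
  rw [(hvals k).1, PySem.List.count_eq]
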